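-- pv_equiv track=rewrite | github.com/zjw0358/convictionbuy | stage1/trade_support.py | getLastSignal
-- ===== SOURCE A (Python) =====
-- def getLastSignal(buysg,sellsg,indct,buykey,sellkey):
--     buyidx = 100000
--     for idx,sig in enumerate(buysg[::-1]):
--         if (sig!=""):
--             buyidx = idx
--             break;
--     sellidx = 100000
--     for idx,sig in enumerate(sellsg[::-1]):
--         if (sig!=""):
--             sellidx = idx
--             break;
--
--     if (sellidx < buyidx):
--         indct[sellkey] = int(sellidx)
--         return sellidx,"sell"
--     else:
--         indct[buykey] = int(buyidx)
--         return buyidx,"buy"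
-- ===== SOURCE B (Python) =====
-- def getLastSignal(buysg, sellsg, indct, buykey, sellkey):
--     # Forward single scan, no slicing/reversal: keep overwriting the
--     # distance-from-end of the latest non-empty signal seen so far.
--     buyidx = 100000
--     n = len(buysg)
--     for i, sig in enumerate(buysg):
--         if sig != "":
--             buyidx = n - 1 - i
--     sellidx = 100000
--     m = len(sellsg)
--     for i, sig in enumerate(sellsg):
--         if sig != "":
--             sellidx = m - 1 - i
--     if sellidx < buyidx:
--         indct[sellkey] = int(sellidx)
--         return sellidx, "sell"
--     else:
--         indct[buykey] = int(buyidx)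
--         return buyidx, "buy"
-- ===== Notes on version B (the rewrite author's own statement) =====
-- stated objective: alternative
-- what changed: Replaces A's reversed-copy slice ([::-1]) plus enumerate-with-break per list by a single forward pass that overwrites a running distance-from-end (len-1-i) at every non-empty element, removing the list reversal and the early exit.
import Mathlib
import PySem

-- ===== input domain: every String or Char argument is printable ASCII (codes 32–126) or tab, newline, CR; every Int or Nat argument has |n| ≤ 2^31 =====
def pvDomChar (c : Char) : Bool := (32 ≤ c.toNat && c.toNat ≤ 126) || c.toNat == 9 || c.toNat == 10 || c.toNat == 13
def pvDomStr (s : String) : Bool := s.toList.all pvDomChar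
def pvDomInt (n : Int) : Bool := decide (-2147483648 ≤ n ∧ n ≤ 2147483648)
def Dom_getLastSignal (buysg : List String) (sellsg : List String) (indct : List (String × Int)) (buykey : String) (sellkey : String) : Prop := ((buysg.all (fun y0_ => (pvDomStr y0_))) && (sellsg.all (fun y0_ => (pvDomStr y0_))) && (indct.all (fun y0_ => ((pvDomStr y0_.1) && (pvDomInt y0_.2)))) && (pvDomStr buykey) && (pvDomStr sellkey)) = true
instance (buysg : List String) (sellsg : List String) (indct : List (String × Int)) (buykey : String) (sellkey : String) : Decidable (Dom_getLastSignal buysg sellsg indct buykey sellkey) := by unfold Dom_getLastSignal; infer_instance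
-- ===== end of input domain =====

-- B replaces A's reversed-slice + enumerate-with-break by one forward pass that keeps
-- overwriting the distance-from-end of the latest non-empty signal (alternative
-- decomposition, same cost). Both Pythons mutate indct identically (indct[key] = idx);
-- the equivalence proved here is about the RETURN value, which does not depend on indct.

-- ===== PORT A =====
-- A's loop "for idx,sig in enumerate(lst[::-1]): if sig != '': x = idx; break",
-- started at x = 100000: structural recursion on the reversed list carrying idx.
def pvGoA : List String → Int → Int
  | [], _ => 100000
  | s :: rest, i => if s ≠ "" then i else pvGoA rest (i + 1)

def getLastSignal (buysg : List String) (sellsg : List String) (indct : List (String × Int)) (buykey : String) (sellkey : String) : Int × String :=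
  -- lst[::-1] = lst.reverse (PySem.List.slice?_none_none_neg_one)
  let buyidx := pvGoA buysg.reverse 0
  let sellidx := pvGoA sellsg.reverse 0
  if sellidx < buyidx then (sellidx, "sell") else (buyidx, "buy")

-- ===== PORT B =====
-- B's loop "for i,sig in enumerate(lst): if sig != '': x = n-1-i", x starting at 100000.
def pvGoB (n : Int) (l : List String) : Int :=
  (PySem.List.enumerate l 0).foldl (fun acc p => if p.2 ≠ "" then n - 1 - p.1 else acc) 100000

def getLastSignal_alt (buysg : List String) (sellsg : List String) (indct : List (String × Int)) (buykey : String) (sellkey : String) : Int × String :=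
  let buyidx := pvGoB (buysg.length : Int) buysg
  let sellidx := pvGoB (sellsg.length : Int) sellsg
  if sellidx < buyidx then (sellidx, "sell") else (buyidx, "buy")

-- ===== PRECONDITION & SPEC =====
def Spec_getLastSignal (buysg : List String) (sellsg : List String) (indct : List (String × Int)) (buykey : String) (sellkey : String) (out : Int × String) : Prop := out = getLastSignal_alt buysg sellsg indct buykey sellkey
instance (buysg : List String) (sellsg : List String) (indct : List (String × Int)) (buykey : String) (sellkey : String) (out : Int × String) : Decidable (Spec_getLastSignal buysg sellsg indct buykey sellkey out) := by unfold Spec_getLastSignal; infer_instance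

-- ===== CLAIM (what is proved, stated in full; the proofs are below) =====
def Claim_equal_getLastSignal : Prop := ∀ (buysg : List String) (sellsg : List String) (indct : List (String × Int)) (buykey : String) (sellkey : String), Dom_getLastSignal buysg sellsg indct buykey sellkey → Spec_getLastSignal buysg sellsg indct buykey sellkey (getLastSignal buysg sellsg indct buykey sellkey)

-- ===== LEMMAS AND PROOFS =====

-- A's reversed scan computes the first non-empty index (offset by i), else 100000.
theorem pvGoA_spec (xs : List String) (i : Int) :
    pvGoA xs i = (match xs.findIdx? (fun s => s ≠ "") with
                  | some m => i + (m : Int)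
                  | none => 100000) := by
  induction xs generalizing i with
  | nil => simp [pvGoA]
  | cons s rest ih =>
    simp only [pvGoA, List.findIdx?_cons]
    by_cases hs : s = ""
    · simp only [hs]
      rw [ih (i + 1)]
      cases h : rest.findIdx? (fun s => s ≠ "") <;> simp [h] <;> push_cast <;> ring
    · simp [hs]

-- B's forward overwrite-fold, generalized over start index and accumulator.
theorem pvGoB_gen (l : List String) (n k acc : Int) :
    (PySem.List.enumerate l k).foldl (fun acc p => if p.2 ≠ "" then n - 1 - p.1 else acc) acc
      = (match l.reverse.findIdx? (fun s => s ≠ "") with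
         | some m => n - 1 - (k + ((l.length : Int) - 1 - (m : Int)))
         | none => acc) := by
  induction l generalizing k acc with
  | nil => simp [PySem.List.enumerate_nil]
  | cons s rest ih =>
    rw [PySem.List.enumerate_cons]
    simp only [List.foldl_cons]
    rw [ih]
    simp only [List.reverse_cons, List.findIdx?_append]
    cases h : rest.reverse.findIdx? (fun s => s ≠ "") with
    | some m =>
      simp only [h, Option.or]
      have : (rest.length : Int) - 1 - (m : Int) + (k + 1) = ((rest.length + 1 : Nat) : Int) - 1 - (m : Int) + k := by
        push_cast; ring
      simp only [List.length_cons]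
      congr 1
      push_cast; ring
    | none =>
      simp only [h, Option.or, List.findIdx?_cons, List.findIdx?_nil, List.length_reverse,
        List.length_cons]
      by_cases hs : s = ""
      · simp [hs]
      · simp only [ne_eq, hs, not_false_eq_true, decide_true, if_true, Option.map_some,
          Option.map_none]
        push_cast; ring

theorem pvGoB_eq_pvGoA (l : List String) :
    pvGoB (l.length : Int) l = pvGoA l.reverse 0 := by
  rw [pvGoB, pvGoB_gen, pvGoA_spec]
  cases h : l.reverse.findIdx? (fun s => s ≠ "") <;> simp [h] <;> push_cast <;> ring

-- ===== VERDICT (by name: the statement is the Claim_ definition above) =====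
theorem getLastSignal_spec : Claim_equal_getLastSignal := by
  intro buysg sellsg indct buykey sellkey _
  unfold Spec_getLastSignal getLastSignal getLastSignal_alt
  rw [pvGoB_eq_pvGoA, pvGoB_eq_pvGoA]
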